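-- pv_equiv track=rewrite | github.com/zhang0098/jpxstockdatadl | src/jpxstockdatadl/downloader.py | collect_financial_columns
-- ===== SOURCE A (Python) =====
-- from typing import Any, Iterable
--
-- PREFERRED_FINANCIAL_FIELD_ORDER = (
--     "revenue",
--     "operating_income",
--     "ordinary_income",
--     "net_income",
--     "comprehensive_income",
--     "total_assets",
--     "total_liabilities",
--     "net_assets",
--     "cash_and_equivalents",
--     "operating_cf",
--     "investing_cf",
--     "financing_cf",
--     "capital_stock",
--     "short_term_loans",
--     "current_portion_lt_loans",
--     "bonds_payable",
--     "long_term_loans",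
--     "eps",
--     "diluted_eps",
--     "bps",
--     "dividends_per_share",
--     "equity_ratio",
--     "roe",
--     "payout_ratio",
--     "pe_ratio",
--     "num_employees",
-- )
--
-- def collect_financial_columns(records: list[dict[str, Any]]) -> list[str]:
--     discovered = {
--         field_name
--         for record in records
--         for field_name in record["row"].keys()
--     }
--     ordered = [
--         field_name
--         for field_name in PREFERRED_FINANCIAL_FIELD_ORDER
--         if field_name in discovered
--     ]
--     extras = sorted(discovered.difference(PREFERRED_FINANCIAL_FIELD_ORDER))
--     return ordered + extras
-- ===== SOURCE B (Python) =====
-- PREFERRED_FINANCIAL_FIELD_ORDER = (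
--     "revenue", "operating_income", "ordinary_income", "net_income",
--     "comprehensive_income", "total_assets", "total_liabilities", "net_assets",
--     "cash_and_equivalents", "operating_cf", "investing_cf", "financing_cf",
--     "capital_stock", "short_term_loans", "current_portion_lt_loans",
--     "bonds_payable", "long_term_loans", "eps", "diluted_eps", "bps",
--     "dividends_per_share", "equity_ratio", "roe", "payout_ratio",
--     "pe_ratio", "num_employees",
-- )
--
-- _RANK = {name: i for i, name in enumerate(PREFERRED_FINANCIAL_FIELD_ORDER)}
--
--
-- def collect_financial_columns(records):
--     overflow = len(PREFERRED_FINANCIAL_FIELD_ORDER)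
--     keyed = {
--         field_name: (_RANK.get(field_name, overflow), field_name)
--         for record in records
--         for field_name in record["row"]
--     }
--     return [name for _, name in sorted(keyed.values())]
-- ===== Notes on version B (the rewrite author's own statement) =====
-- stated objective: alternative
-- what changed: Replaces A's three-phase structure (filter the preferred tuple by membership in the discovered set, set-difference, sort the extras, concatenate) with one pass building a dict keyed by field name whose values are (rank-with-overflow, name) pairs, then a single sort of those pairs and a projection to names.
import Mathlib
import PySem

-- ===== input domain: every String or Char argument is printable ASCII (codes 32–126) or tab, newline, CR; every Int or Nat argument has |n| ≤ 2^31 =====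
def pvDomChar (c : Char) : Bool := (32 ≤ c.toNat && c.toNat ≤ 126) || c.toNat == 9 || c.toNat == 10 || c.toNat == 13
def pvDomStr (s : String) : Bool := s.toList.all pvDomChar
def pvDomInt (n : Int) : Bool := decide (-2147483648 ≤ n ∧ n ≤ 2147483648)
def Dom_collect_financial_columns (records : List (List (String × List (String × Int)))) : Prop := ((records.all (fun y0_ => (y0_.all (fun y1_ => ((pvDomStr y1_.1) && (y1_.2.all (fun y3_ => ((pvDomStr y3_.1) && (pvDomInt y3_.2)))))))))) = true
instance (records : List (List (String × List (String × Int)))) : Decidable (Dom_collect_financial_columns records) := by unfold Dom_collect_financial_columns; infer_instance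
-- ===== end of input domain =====

-- B replaces A's filter + set-difference + sort + concatenate by one dict-building pass
-- keyed by field name with (rank-with-overflow, name) values, a single sort of those
-- pairs and a projection to the names; objective: alternative (same cost, one sort).

-- ===== PORT A =====
def preferredOrder : List String :=
  ["revenue", "operating_income", "ordinary_income", "net_income",
   "comprehensive_income", "total_assets", "total_liabilities", "net_assets",
   "cash_and_equivalents", "operating_cf", "investing_cf", "financing_cf",
   "capital_stock", "short_term_loans", "current_portion_lt_loans",
   "bonds_payable", "long_term_loans", "eps", "diluted_eps", "bps",
   "dividends_per_share", "equity_ratio", "roe", "payout_ratio",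
   "pe_ratio", "num_employees"]

-- record["row"]: first-match dict lookup; `get? = none` is Python's KeyError and is
-- excluded by Pre_, so the `.getD []` default is never reached on admitted inputs.
def pvRow (record : List (String × List (String × Int))) : List (String × Int) :=
  ((PySem.Dict.mk record).get? "row").getD []

-- the set comprehension {field_name for record in records for field_name in record["row"].keys()}
def pvDiscovered (records : List (List (String × List (String × Int)))) : PySem.Set String :=
  records.foldl (fun acc record => PySem.Set.update acc ((pvRow record).map (·.1))) PySem.Set.empty

def collect_financial_columns (records : List (List (String × List (String × Int)))) : List String :=
  let discovered := pvDiscovered records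
  let ordered := preferredOrder.filter (fun field_name => discovered.contains field_name)
  let extras := PySem.List.sorted (PySem.Set.diff discovered (PySem.Set.ofList preferredOrder)) (fun s => s) false
  ordered ++ extras

-- ===== PORT B =====
-- _RANK = {name: i for i, name in enumerate(PREFERRED_FINANCIAL_FIELD_ORDER)}
def pvRank : PySem.Dict String Int :=
  (PySem.List.enumerate preferredOrder 0).foldl (fun d p => d.insert p.2 p.1) (PySem.Dict.mk [])

def collect_financial_columns_alt (records : List (List (String × List (String × Int)))) : List String :=
  let overflow : Int := (preferredOrder.length : Int)
  -- keyed = {field_name: (_RANK.get(field_name, overflow), field_name) for record in records for field_name in record["row"]}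
  let keyed : PySem.Dict String (Int × String) :=
    records.foldl
      (fun d record =>
        (((PySem.Dict.mk record).get? "row").getD []).foldl
          (fun d kv => d.insert kv.1 (pvRank.getD kv.1 overflow, kv.1)) d)
      (PySem.Dict.mk [])
  -- [name for _, name in sorted(keyed.values())]
  (PySem.List.sorted2 keyed.values (fun p => p.1) (fun p => p.2) false).map (fun p => p.2)

-- ===== PRECONDITION & SPEC =====
-- Pre_: every record has a "row" key — exactly where Python A's record["row"] does not raise KeyError.
def Pre_collect_financial_columns (records : List (List (String × List (String × Int)))) : Prop :=
  ∀ record ∈ records, ∃ kv ∈ record, kv.1 = "row"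
instance (records : List (List (String × List (String × Int)))) : Decidable (Pre_collect_financial_columns records) := by unfold Pre_collect_financial_columns; infer_instance

def pvWitness_collect_financial_columns : (List (List (String × List (String × Int)))) :=
  [[("row", [("eps", (3 : Int)), ("zeta", 1)])], [("row", [("revenue", 7)])]]

def Spec_collect_financial_columns (records : List (List (String × List (String × Int)))) (out : List String) : Prop := out = collect_financial_columns_alt records
instance (records : List (List (String × List (String × Int)))) (out : List String) : Decidable (Spec_collect_financial_columns records out) := by unfold Spec_collect_financial_columns; infer_instance

-- ===== CLAIM (what is proved, stated in full; the proofs are below) =====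
def Claim_equal_collect_financial_columns : Prop := ∀ (records : List (List (String × List (String × Int)))), Dom_collect_financial_columns records → Pre_collect_financial_columns records → Spec_collect_financial_columns records (collect_financial_columns records)

-- ===== LEMMAS AND PROOFS =====

-- the value B's dict stores under a discovered name
def pvVal (f : String) : Int × String := (pvRank.getD f 26, f)

-- the common sort key, seen as one value in the lexicographic product
def pvKey (name : String) : Lex (Int × String) := toLex (pvRank.getD name 26, name)

theorem pvKey_injective : Function.Injective pvKey := by
  intro a b h
  have := congrArg (fun x => (ofLex x).2) h
  simpa [pvKey] using this

theorem rank_lt_of_mem (f : String) (h : f ∈ preferredOrder) : pvRank.getD f 26 < 26 := by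
  fin_cases h <;> decide

theorem rank_of_not_mem (f : String) (h : f ∉ preferredOrder) : pvRank.getD f 26 = 26 := by
  have hkeys : pvRank.keys = preferredOrder := by decide
  have hnone : pvRank.get? f = none := by
    rw [PySem.Dict.get?_eq_none_iff_not_mem_keys, hkeys]; exact h
  exact PySem.Dict.getD_of_get?_eq_none _ _ hnone

theorem preferred_pairwise_rank : preferredOrder.Pairwise (fun a b => pvRank.getD a 26 < pvRank.getD b 26) := by
  decide

theorem preferred_nodup : preferredOrder.Nodup := by decide

theorem nodup_discovered (records : List (List (String × List (String × Int)))) :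
    (pvDiscovered records).Nodup := by
  unfold pvDiscovered
  generalize hs : (PySem.Set.empty : PySem.Set String) = s
  have hnd : List.Nodup s := by rw [← hs]; exact List.nodup_nil
  clear hs
  induction records generalizing s with
  | nil => exact hnd
  | cons r rs ih => exact ih _ (PySem.Set.nodup_update _ _ hnd)

-- B's insert loop over a run of names keeps the items in "first-occurrence name ↦ pvVal name" shape
theorem items_insert_names (names : List String) (S : List String)
    (d : PySem.Dict String (Int × String)) (h : d.items = S.map (fun f => (f, pvVal f))) :
    (names.foldl (fun d n => d.insert n (pvVal n)) d).items
      = (PySem.Set.update S names).map (fun f => (f, pvVal f)) := by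
  induction names generalizing S d with
  | nil => simpa [PySem.Set.update] using h
  | cons n ns ih =>
    have hkeys : d.keys = S := by
      rw [PySem.Dict.keys, h, List.map_map]
      exact List.map_id _
    by_cases hmem : n ∈ S
    · have hc : d.contains n = true := by
        rw [PySem.Dict.contains_eq_decide_mem_keys, hkeys]; simpa using hmem
      have hitems : (d.insert n (pvVal n)).items = S.map (fun f => (f, pvVal f)) := by
        rw [PySem.Dict.items_insert_of_contains _ _ hc, h, List.map_map]
        refine List.map_congr_left ?_
        intro f _
        by_cases hf : f = n
        · subst hf; simp [pvVal]
        · simp [Function.comp, hf]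
      have hadd : PySem.Set.add S n = S := by
        simp [PySem.Set.add, hmem]
      have hstep : PySem.Set.update S (n :: ns) = PySem.Set.update (PySem.Set.add S n) ns := by
        simp [PySem.Set.update]
      rw [List.foldl_cons, hstep, hadd]
      exact ih _ _ hitems
    · have hc : d.contains n = false := by
        rw [PySem.Dict.contains_eq_decide_mem_keys, hkeys]; simpa using hmem
      have hitems : (d.insert n (pvVal n)).items = (S ++ [n]).map (fun f => (f, pvVal f)) := by
        rw [PySem.Dict.items_insert_of_not_contains _ _ hc, h]; simp
      have hadd : PySem.Set.add S n = S ++ [n] := by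
        simp [PySem.Set.add, hmem]
      have hstep : PySem.Set.update S (n :: ns) = PySem.Set.update (PySem.Set.add S n) ns := by
        simp [PySem.Set.update]
      rw [List.foldl_cons, hstep, hadd]
      exact ih _ _ hitems

-- the whole nested dict-comprehension loop of B, related to A's discovered set
theorem items_keyed (records : List (List (String × List (String × Int)))) :
    (records.foldl
      (fun d record =>
        ((pvRow record).foldl (fun d kv => d.insert kv.1 (pvVal kv.1)) d))
      (PySem.Dict.mk [])).items
      = (pvDiscovered records).map (fun f => (f, pvVal f)) := by
  unfold pvDiscovered
  generalize hS : (PySem.Set.empty : PySem.Set String) = S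
  have h0 : (PySem.Dict.mk ([] : List (String × (Int × String)))).items
      = S.map (fun f => (f, pvVal f)) := by
    rw [← hS]; rfl
  generalize hd : (PySem.Dict.mk ([] : List (String × (Int × String)))) = d
  rw [hd] at h0
  clear hS hd
  induction records generalizing S d with
  | nil => exact h0
  | cons r rs ih =>
    simp only [List.foldl_cons]
    refine ih _ _ ?_
    have hmap : (pvRow r).foldl (fun d kv => d.insert kv.1 (pvVal kv.1)) d
        = ((pvRow r).map (·.1)).foldl (fun d n => d.insert n (pvVal n)) d := by
      rw [List.foldl_map]
    rw [hmap]
    exact items_insert_names _ _ _ h0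

-- insertion into a list that is Pairwise R stays Pairwise R, for the boolean order `before`
theorem pairwise_insertBy {α : Type} (R : α → α → Prop) (before : α → α → Bool)
    (htrans : ∀ a b c, R a b → R b c → R a c)
    (htrue : ∀ a b, before a b = true → R a b)
    (hfalse : ∀ a b, before a b = false → R b a)
    (x : α) (acc : List α) (h : acc.Pairwise R) :
    (PySem.List.insertBy before x acc).Pairwise R := by
  induction acc with
  | nil => simp [PySem.List.insertBy]
  | cons y ys ih =>
    rw [List.pairwise_cons] at h
    by_cases hb : before x y = true
    · simp only [PySem.List.insertBy, hb, if_true]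
      refine List.pairwise_cons.mpr ⟨?_, List.pairwise_cons.mpr ⟨h.1, h.2⟩⟩
      intro z hz
      rcases List.mem_cons.mp hz with rfl | hz
      · exact htrue _ _ hb
      · exact htrans _ _ _ (htrue _ _ hb) (h.1 z hz)
    · have hb' : before x y = false := by simpa using hb
      simp only [PySem.List.insertBy, hb', Bool.false_eq_true, if_false]
      refine List.pairwise_cons.mpr ⟨?_, ih h.2⟩
      intro z hz
      rcases (PySem.List.mem_insertBy before x z ys).mp hz with rfl | hz'
      · exact hfalse _ _ hb'
      · exact h.1 z hz'

-- the result of B's sort of (Int, String) pairs is Pairwise in the lexicographic order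
theorem pairwise_lex_sorted2 (L : List (Int × String)) :
    (PySem.List.sorted2 L (fun p => p.1) (fun p => p.2) false).Pairwise
      (fun a b => toLex a ≤ toLex b) := by
  have hins : ∀ (x : Int × String) (acc : List (Int × String)),
      acc.Pairwise (fun a b => toLex a ≤ toLex b) →
      (PySem.List.insertBy
        (fun a b => decide (a.1 < b.1) || !decide (b.1 < a.1) && decide (a.2 < b.2)) x acc).Pairwise
        (fun a b => toLex a ≤ toLex b) := by
    intro x acc h
    refine pairwise_insertBy (fun a b => toLex a ≤ toLex b) _
      (fun a b c hab hbc => le_trans hab hbc) ?_ ?_ x acc h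
    · intro a b hb
      simp only [Bool.or_eq_true, Bool.and_eq_true, decide_eq_true_eq, Bool.not_eq_true',
        decide_eq_false_iff_not] at hb
      rcases hb with hb | ⟨hb1, hb2⟩
      · exact Prod.Lex.le_iff.mpr (Or.inl hb)
      · rcases (not_lt.mp hb1).lt_or_eq with h' | h'
        · exact Prod.Lex.le_iff.mpr (Or.inl h')
        · exact Prod.Lex.le_iff.mpr (Or.inr ⟨h', le_of_lt hb2⟩)
    · intro a b hb
      rw [Bool.or_eq_false_iff] at hb
      obtain ⟨hA, hB⟩ := hb
      have hA' : ¬ a.1 < b.1 := by simpa using hA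
      rw [Bool.and_eq_false_iff] at hB
      rcases hB with hB | hB
      · have hlt : b.1 < a.1 := by simpa using hB
        exact Prod.Lex.le_iff.mpr (Or.inl hlt)
      · have hab : ¬ a.2 < b.2 := by simpa using hB
        by_cases hlt : b.1 < a.1
        · exact Prod.Lex.le_iff.mpr (Or.inl hlt)
        · exact Prod.Lex.le_iff.mpr
            (Or.inr ⟨le_antisymm (not_lt.mp hA') (not_lt.mp hlt), not_lt.mp hab⟩)
  show (List.foldl _ ([] : List (Int × String)) L).Pairwise _
  generalize hacc : ([] : List (Int × String)) = acc
  have h0 : acc.Pairwise (fun a b => toLex a ≤ toLex b) := by rw [← hacc]; exact List.Pairwise.nil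
  clear hacc
  induction L generalizing acc with
  | nil => exact h0
  | cons x xs ih => exact ih _ (hins x acc h0)

-- A's output is Pairwise in the key
theorem pairwise_key_A (L : List String) :
    (preferredOrder.filter (fun f => PySem.Set.contains L f) ++
      PySem.List.sorted (PySem.Set.diff L (PySem.Set.ofList preferredOrder)) (fun s => s) false).Pairwise
      (fun a b => pvKey a ≤ pvKey b) := by
  rw [List.pairwise_append]
  refine ⟨?_, ?_, ?_⟩
  · refine (preferred_pairwise_rank.filter _).imp ?_
    intro a b hab
    exact Prod.Lex.le_iff.mpr (Or.inl hab)
  · refine (PySem.List.sorted_pairwise _ _).imp_of_mem ?_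
    intro a b ha hb hab
    rw [PySem.List.mem_sorted, PySem.Set.mem_diff, PySem.Set.mem_ofList] at ha hb
    have h1 : pvRank.getD a 26 = pvRank.getD b 26 := by
      rw [rank_of_not_mem a ha.2, rank_of_not_mem b hb.2]
    exact Prod.Lex.le_iff.mpr (Or.inr ⟨h1, hab⟩)
  · intro a ha b hb
    have ha' : a ∈ preferredOrder := (List.mem_filter.mp ha).1
    rw [PySem.List.mem_sorted, PySem.Set.mem_diff, PySem.Set.mem_ofList] at hb
    have h1 : pvRank.getD a 26 < pvRank.getD b 26 := by
      rw [rank_of_not_mem b hb.2]; exact rank_lt_of_mem a ha'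
    exact Prod.Lex.le_iff.mpr (Or.inl h1)

theorem perm_A (L : List String) (hL : L.Nodup) :
    (preferredOrder.filter (fun f => PySem.Set.contains L f) ++
      PySem.List.sorted (PySem.Set.diff L (PySem.Set.ofList preferredOrder)) (fun s => s) false).Perm L := by
  have hnd1 : (preferredOrder.filter (fun f => PySem.Set.contains L f)).Nodup :=
    preferred_nodup.filter _
  have hnd2 : (PySem.List.sorted (PySem.Set.diff L (PySem.Set.ofList preferredOrder)) (fun s => s) false).Nodup :=
    (PySem.List.sorted_perm _ _ _).symm.nodup (PySem.Set.nodup_diff _ _ hL)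
  have hdisj : (preferredOrder.filter (fun f => PySem.Set.contains L f)).Disjoint
      (PySem.List.sorted (PySem.Set.diff L (PySem.Set.ofList preferredOrder)) (fun s => s) false) := by
    intro a ha hb
    rw [PySem.List.mem_sorted, PySem.Set.mem_diff, PySem.Set.mem_ofList] at hb
    exact hb.2 (List.mem_filter.mp ha).1
  rw [List.perm_ext_iff_of_nodup (hnd1.append hnd2 hdisj) hL]
  intro a
  simp only [List.mem_append, List.mem_filter, PySem.List.mem_sorted, PySem.Set.mem_diff,
    PySem.Set.mem_ofList, PySem.Set.contains_iff]
  by_cases hp : a ∈ preferredOrder <;> by_cases hm : a ∈ L <;> simp [hp, hm]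

-- B's output: a permutation of the discovered set, Pairwise in the key
theorem B_eq_sorted_of_map (records : List (List (String × List (String × Int)))) :
    collect_financial_columns_alt records
      = (PySem.List.sorted2 ((pvDiscovered records).map pvVal)
          (fun p => p.1) (fun p => p.2) false).map (fun p => p.2) := by
  unfold collect_financial_columns_alt
  have hvals :
      (records.foldl
        (fun d record =>
          (((PySem.Dict.mk record).get? "row").getD []).foldl
            (fun d kv => d.insert kv.1 (pvRank.getD kv.1 ((preferredOrder.length : Nat) : Int), kv.1)) d)
        (PySem.Dict.mk [])).values
        = (pvDiscovered records).map pvVal := by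
    have h26 : ((preferredOrder.length : Nat) : Int) = 26 := by decide
    have := items_keyed records
    unfold pvRow at this
    simp only [PySem.Dict.values, h26]
    rw [show (fun (d : PySem.Dict String (Int × String)) (kv : String × Int) =>
          d.insert kv.1 (pvRank.getD kv.1 26, kv.1))
        = (fun d kv => d.insert kv.1 (pvVal kv.1)) from by funext d kv; rfl]
    rw [this, List.map_map]
    rfl
  show (PySem.List.sorted2
      (records.foldl
        (fun d record =>
          (((PySem.Dict.mk record).get? "row").getD []).foldl
            (fun d kv => d.insert kv.1 (pvRank.getD kv.1 ((preferredOrder.length : Nat) : Int), kv.1)) d)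
        (PySem.Dict.mk [])).values (fun p => p.1) (fun p => p.2) false).map (fun p => p.2) = _
  rw [hvals]

theorem perm_B (records : List (List (String × List (String × Int)))) :
    (collect_financial_columns_alt records).Perm (pvDiscovered records) := by
  rw [B_eq_sorted_of_map]
  have h1 := PySem.List.sorted2_perm ((pvDiscovered records).map pvVal)
    (fun p : Int × String => p.1) (fun p : Int × String => p.2) false
  have h2 := h1.map (fun p : Int × String => p.2)
  rw [List.map_map] at h2
  have : ((pvDiscovered records).map ((fun p : Int × String => p.2) ∘ pvVal))
      = pvDiscovered records := by
    simp [pvVal, Function.comp_def]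
  rwa [this] at h2

theorem pairwise_key_B (records : List (List (String × List (String × Int)))) :
    (collect_financial_columns_alt records).Pairwise (fun a b => pvKey a ≤ pvKey b) := by
  rw [B_eq_sorted_of_map]
  rw [List.pairwise_map]
  have hpw := pairwise_lex_sorted2 ((pvDiscovered records).map pvVal)
  refine hpw.imp_of_mem ?_
  intro a b ha hb hab
  have hmemA : a ∈ (pvDiscovered records).map pvVal :=
    (PySem.List.sorted2_perm _ _ _ _).mem_iff.mp ha
  have hmemB : b ∈ (pvDiscovered records).map pvVal :=
    (PySem.List.sorted2_perm _ _ _ _).mem_iff.mp hb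
  obtain ⟨fa, _, rfl⟩ := List.mem_map.mp hmemA
  obtain ⟨fb, _, rfl⟩ := List.mem_map.mp hmemB
  exact hab

-- ===== VERDICT (by name: the statement is the Claim_ definition above) =====
theorem collect_financial_columns_spec : Claim_equal_collect_financial_columns := by
  intro records _ _
  unfold Spec_collect_financial_columns
  have hL : (pvDiscovered records).Nodup := nodup_discovered records
  have hA : (collect_financial_columns records).Perm (pvDiscovered records) :=
    perm_A (pvDiscovered records) hL
  have hApw : (collect_financial_columns records).Pairwise (fun a b => pvKey a ≤ pvKey b) :=
    pairwise_key_A (pvDiscovered records)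
  exact PySem.List.eq_of_perm_of_pairwise_le_of_injective pvKey pvKey_injective
    (hA.trans (perm_B records).symm) hApw (pairwise_key_B records)
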